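-- pv_equiv track=rewrite | github.com/mush60/altera-batch5- | Struktur Data/Problem 2/1-Statistik.py | minimal
-- ===== SOURCE A (Python) =====
-- def minimal(lists) :
--     res = []
--     for ls in lists :
--         for i in range(len(ls)) :
--             for j in range(i+1, len(ls)) :
--                 if ls[i] > ls[j] :
--                     temp = ls[i]
--                     ls[i] = ls[j]
--                     ls[j] = temp
--         res.append(str(ls[0]))
--     return res
-- ===== SOURCE B (Python) =====
-- def minimal(lists):
--     return [str(min(ls)) for ls in lists]
-- ===== Notes on version B (the rewrite author's own statement) =====
-- stated objective: faster
-- what changed: A fully exchange-sorts each sublist in place with a quadratic double loop and reads index 0; B takes the built-in min of each sublist in one linear pass (no sorting, no mutation).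
import Mathlib
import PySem

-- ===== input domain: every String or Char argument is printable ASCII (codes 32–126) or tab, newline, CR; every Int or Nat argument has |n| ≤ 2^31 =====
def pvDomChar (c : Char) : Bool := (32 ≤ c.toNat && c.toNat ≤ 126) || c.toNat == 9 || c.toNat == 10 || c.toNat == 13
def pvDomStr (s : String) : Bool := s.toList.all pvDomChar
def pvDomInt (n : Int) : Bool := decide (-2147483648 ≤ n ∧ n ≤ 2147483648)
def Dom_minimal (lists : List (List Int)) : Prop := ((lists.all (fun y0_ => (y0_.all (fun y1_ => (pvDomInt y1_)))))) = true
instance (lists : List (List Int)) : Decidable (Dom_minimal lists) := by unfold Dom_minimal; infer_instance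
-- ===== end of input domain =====

-- B replaces A's in-place quadratic exchange sort of every sublist by the built-in minimum in one linear
-- pass per sublist (objective: faster). A sorts each sublist in place as a side effect; B does not mutate
-- its argument — the equivalence proved here is about the RETURN value only.

-- ===== PORT A =====
-- 'if ls[i] > ls[j]: temp = ls[i]; ls[i] = ls[j]; ls[j] = temp'
-- (i, j always come from range(len(ls)), so they are in range and pyGetD/pySetD are exact here)
def pvSwapA (ls : List Int) (i j : Int) : List Int :=
  if PySem.List.pyGetD ls j 0 < PySem.List.pyGetD ls i 0 then
    let temp := PySem.List.pyGetD ls i 0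
    PySem.List.pySetD (PySem.List.pySetD ls i (PySem.List.pyGetD ls j 0)) j temp
  else ls

-- 'for j in range(i+1, len(ls)): …'
def pvPassA (ls : List Int) (i : Int) : List Int :=
  (PySem.List.pyRange (i + 1) (PySem.List.len ls) 1).foldl (fun a j => pvSwapA a i j) ls

-- 'for i in range(len(ls)): …'
def pvSortA (ls : List Int) : List Int :=
  (PySem.List.pyRange 0 (PySem.List.len ls) 1).foldl (fun a i => pvPassA a i) ls

-- 'res = []; for ls in lists: …sort ls in place…; res.append(str(ls[0]))'
-- ls[0] raises IndexError on an empty sublist: Pre_minimal excludes those inputs, so the default 0 is never read under Pre_.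
def minimal (lists : List (List Int)) : List String :=
  lists.foldl (fun res ls => res ++ [PySem.Int.toStr (PySem.List.pyGetD (pvSortA ls) 0 0)]) []

-- ===== PORT B =====
-- '[str(min(ls)) for ls in lists]'; min([]) raises ValueError, excluded by Pre_minimal, so .getD 0 is never read under Pre_.
def minimal_alt (lists : List (List Int)) : List String :=
  lists.map (fun ls => PySem.Int.toStr ((PySem.List.min? ls (fun x => x)).getD 0))

-- ===== PRECONDITION & SPEC =====
-- On inputs containing an empty sublist both A (IndexError on ls[0]) and B (ValueError from min) raise; Pre_ excludes exactly those.
def Pre_minimal (lists : List (List Int)) : Prop := ∀ ls ∈ lists, ls ≠ []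
instance (lists : List (List Int)) : Decidable (Pre_minimal lists) := by unfold Pre_minimal; infer_instance
def pvWitness_minimal : List (List Int) := [[3, 1, 2], [5], [-4, 7]]
def Spec_minimal (lists : List (List Int)) (out : List String) : Prop := out = minimal_alt lists
instance (lists : List (List Int)) (out : List String) : Decidable (Spec_minimal lists out) := by unfold Spec_minimal; infer_instance

-- ===== CLAIM (what is proved, stated in full; the proofs are below) =====
def Claim_equal_minimal : Prop := ∀ (lists : List (List Int)), Dom_minimal lists → Pre_minimal lists → Spec_minimal lists (minimal lists)

-- ===== LEMMAS AND PROOFS =====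

-- a swap at positions (i, j) with 0 < i, 0 < j leaves entry 0 unchanged
theorem pvSwapA_getD_zero_ne (ls : List Int) (i j : Int) (hi : 0 < i) (hj : 0 < j) :
    PySem.List.pyGetD (pvSwapA ls i j) 0 0 = PySem.List.pyGetD ls 0 0 := by
  unfold pvSwapA
  split
  · show PySem.List.pyGetD (PySem.List.pySetD (PySem.List.pySetD ls i (PySem.List.pyGetD ls j 0)) j (PySem.List.pyGetD ls i 0)) 0 0 = _
    rw [PySem.List.pySetD_of_nonneg _ _ (le_of_lt hi), PySem.List.pySetD_of_nonneg _ _ (le_of_lt hj),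
        PySem.List.pyGetD_zero, PySem.List.pyGetD_zero]
    simp [List.getD, List.getElem?_set_ne (by omega : j.toNat ≠ 0), List.getElem?_set_ne (by omega : i.toNat ≠ 0)]
  · rfl

-- a swap at (0, j) with 0 < j < len puts the minimum of the two entries at position 0
theorem pvSwapA_getD_zero (ls : List Int) (j : Int) (hj : 0 < j) (hjl : j < (ls.length : Int)) :
    PySem.List.pyGetD (pvSwapA ls 0 j) 0 0 =
      min (PySem.List.pyGetD ls 0 0) (PySem.List.pyGetD ls j 0) := by
  unfold pvSwapA
  split
  · show PySem.List.pyGetD (PySem.List.pySetD (PySem.List.pySetD ls 0 (PySem.List.pyGetD ls j 0)) j (PySem.List.pyGetD ls 0 0)) 0 0 = _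
    rw [PySem.List.pySetD_of_nonneg _ _ (le_refl 0), PySem.List.pySetD_of_nonneg _ _ (le_of_lt hj),
        PySem.List.pyGetD_zero]
    simp only [Int.toNat_zero]
    rw [List.getD, List.getElem?_set_ne (by omega : j.toNat ≠ 0),
        List.getElem?_set_self (by omega : (0:Nat) < ls.length)]
    rename_i h
    simp
    omega
  · rename_i h
    omega

-- a swap at (0, j) leaves entries at positions k ∉ {0, j} unchanged
theorem pvSwapA_getD_ne (ls : List Int) (j k : Int) (hj : 0 < j) (hk : 0 < k) (hkj : k ≠ j) :
    PySem.List.pyGetD (pvSwapA ls 0 j) k 0 = PySem.List.pyGetD ls k 0 := by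
  unfold pvSwapA
  split
  · show PySem.List.pyGetD (PySem.List.pySetD (PySem.List.pySetD ls 0 (PySem.List.pyGetD ls j 0)) j (PySem.List.pyGetD ls 0 0)) k 0 = _
    rw [PySem.List.pySetD_of_nonneg _ _ (le_refl 0), PySem.List.pySetD_of_nonneg _ _ (le_of_lt hj),
        PySem.List.pyGetD_of_nonneg _ _ (le_of_lt hk), PySem.List.pyGetD_of_nonneg _ _ (le_of_lt hk)]
    simp [List.getD, List.getElem?_set_ne (by omega : j.toNat ≠ k.toNat), List.getElem?_set_ne (by omega : (0:Nat) ≠ k.toNat)]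
  · rfl

-- pass i = 0: folding swaps (0, j) over strictly increasing positive in-range js accumulates the running min at 0
theorem pass0_min (js : List Int) : ∀ acc : List Int,
    (∀ j ∈ js, 0 < j ∧ j < (acc.length : Int)) → js.Pairwise (· < ·) →
    PySem.List.pyGetD (js.foldl (fun a j => pvSwapA a 0 j) acc) 0 0 =
      js.foldl (fun m j => min m (PySem.List.pyGetD acc j 0)) (PySem.List.pyGetD acc 0 0) := by
  induction js with
  | nil => intro acc _ _; rfl
  | cons j rest ih =>
    intro acc hmem hpw
    have hj := hmem j (List.mem_cons_self)
    have hlen : (pvSwapA acc 0 j).length = acc.length := by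
      unfold pvSwapA; split <;> simp
    simp only [List.foldl_cons]
    rw [ih (pvSwapA acc 0 j)
        (fun j' hj' => by rw [hlen]; exact hmem j' (List.mem_cons_of_mem _ hj'))
        (List.Pairwise.of_cons hpw)]
    rw [pvSwapA_getD_zero acc j hj.1 hj.2]
    exact PySem.List.foldl_congr_mem rest _ _ _
      (fun m j' hj' => by
        rw [pvSwapA_getD_ne acc j j' hj.1 (hmem j' (List.mem_cons_of_mem _ hj')).1
            (by have := (List.pairwise_cons.mp hpw).1 j' hj'; omega)])

-- a whole inner pass with i > 0 leaves entry 0 unchanged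
theorem pass_getD_zero_aux (i : Int) (hi : 0 < i) (js : List Int) : ∀ acc : List Int,
    (∀ j ∈ js, 0 < j) →
    PySem.List.pyGetD (js.foldl (fun a j => pvSwapA a i j) acc) 0 0 = PySem.List.pyGetD acc 0 0 := by
  induction js with
  | nil => intro acc _; rfl
  | cons j rest ih =>
    intro acc hmem
    simp only [List.foldl_cons]
    rw [ih _ (fun j' hj' => hmem j' (List.mem_cons_of_mem _ hj')),
        pvSwapA_getD_zero_ne acc i j hi (hmem j List.mem_cons_self)]

theorem pass_getD_zero (i : Int) (hi : 0 < i) (acc : List Int) :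
    PySem.List.pyGetD (pvPassA acc i) 0 0 = PySem.List.pyGetD acc 0 0 := by
  unfold pvPassA
  exact pass_getD_zero_aux i hi _ acc
    (fun j hj => by have := PySem.List.mem_pyRange_one.mp hj; omega)

-- all outer passes i = 1, 2, … leave entry 0 unchanged
theorem passes_getD_zero (is : List Int) : ∀ acc : List Int, (∀ i ∈ is, 0 < i) →
    PySem.List.pyGetD (is.foldl (fun a i => pvPassA a i) acc) 0 0 = PySem.List.pyGetD acc 0 0 := by
  induction is with
  | nil => intro acc _; rfl
  | cons i rest ih =>
    intro acc hmem
    simp only [List.foldl_cons]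
    rw [ih _ (fun i' hi' => hmem i' (List.mem_cons_of_mem _ hi')),
        pass_getD_zero i (hmem i List.mem_cons_self) acc]

-- A's per-sublist result: entry 0 of the exchange-sorted list is the running minimum of the list
theorem pvSortA_head (x : Int) (t : List Int) :
    PySem.List.pyGetD (pvSortA (x :: t)) 0 0 = t.foldl min x := by
  unfold pvSortA
  have hn : (0:Int) < PySem.List.len (x :: t) := by simp [PySem.List.len]
  rw [PySem.List.pyRange_one_cons hn, List.foldl_cons,
      passes_getD_zero _ _ (fun i hi => by have := PySem.List.mem_pyRange_one.mp hi; omega)]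
  unfold pvPassA
  have h01 : (0:Int) + 1 = 1 := by omega
  rw [h01]
  rw [pass0_min _ _ (fun j hj => by
        have := PySem.List.mem_pyRange_one.mp hj
        simp [PySem.List.len] at this
        constructor; omega; simpa using this.2)
      (PySem.List.pairwise_lt_pyRange_one _ _)]
  rw [PySem.List.foldl_pyRange_pyGetD (x :: t) 0 (fun m v => min m v) _ (by omega : (0:Int) ≤ 1)]
  simp [PySem.List.pyGetD_zero]

theorem foldl_append_singleton (g : List Int → String) (l : List (List Int)) :
    ∀ acc : List String, l.foldl (fun r ls => r ++ [g ls]) acc = acc ++ l.map g := by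
  induction l with
  | nil => simp
  | cons h t ih => intro acc; simp [List.foldl_cons, ih]

-- ===== VERDICT (by name: the statement is the Claim_ definition above) =====
theorem minimal_spec : Claim_equal_minimal := by
  intro lists _ hpre
  unfold Spec_minimal minimal minimal_alt
  rw [foldl_append_singleton]
  simp only [List.nil_append]
  apply List.map_congr_left
  intro ls hls
  match h : ls, hpre ls hls with
  | [], hne => exact absurd rfl hne
  | x :: t, _ =>
    rw [pvSortA_head, PySem.List.min?_id_cons]
    rfl
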